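-- pv_equiv track=rewrite | github.com/mailsonfp/googlepreptech | isomorphic_string.py | is_isomorphic_approach_two
-- ===== SOURCE A (Python) =====
-- def is_isomorphic_approach_two(s, t):
--     if len(s) != len(t):
--         return False
--
--     map_chars = dict()
--     set_vals = set()
--
--     for i in range(len(s)):
--         s_char = s[i]
--         t_char = t[i]
--         if s[i] in map_chars:
--             if map_chars[s_char] != t_char:
--                 return False
--         else:
--             if t_char in set_vals:
--                 return False
--             map_chars[s_char] = t_char
--             set_vals.add(t_char)
--
--     return True
-- ===== SOURCE B (Python) =====
-- def is_isomorphic_approach_two(s, t):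
--     if len(s) != len(t):
--         return False
--     return len(set(s)) == len(set(t)) == len(set(zip(s, t)))
-- ===== Notes on version B (the rewrite author's own statement) =====
-- stated objective: idiomatic
-- what changed: Replaced the per-index loop maintaining a forward char map and a used-target set with the set-cardinality identity len(set(s)) == len(set(t)) == len(set(zip(s, t))) after the length guard.
import Mathlib
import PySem

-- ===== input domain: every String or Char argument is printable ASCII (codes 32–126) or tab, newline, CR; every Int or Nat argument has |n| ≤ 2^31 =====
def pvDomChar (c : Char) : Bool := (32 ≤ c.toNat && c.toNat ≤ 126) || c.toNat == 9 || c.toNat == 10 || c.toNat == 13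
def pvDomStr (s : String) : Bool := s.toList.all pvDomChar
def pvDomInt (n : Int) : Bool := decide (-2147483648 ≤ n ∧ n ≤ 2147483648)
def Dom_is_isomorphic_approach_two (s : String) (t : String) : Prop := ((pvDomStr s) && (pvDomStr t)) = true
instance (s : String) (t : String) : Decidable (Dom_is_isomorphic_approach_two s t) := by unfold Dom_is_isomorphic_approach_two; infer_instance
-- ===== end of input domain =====

-- B replaces A's index loop (forward map + used-target set with early returns) by the
-- idiomatic set-cardinality identity len(set(s)) == len(set(t)) == len(set(zip(s,t))).

-- ===== PORT A =====
-- the `for i in range(len(s))` loop, walking both strings in step (lengths are equal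
-- when the loop is entered); early `return False` is the `false` branches
def pvALoop : List Char → List Char → PySem.Dict Char Char → PySem.Set Char → Bool
  | sc :: ss, tc :: ts, m, v =>
    match m.get? sc with
    | some mv => if mv ≠ tc then false else pvALoop ss ts m v
    | none =>
      if PySem.Set.contains v tc then false
      else pvALoop ss ts (m.insert sc tc) (PySem.Set.add v tc)
  | _, _, _, _ => true

def is_isomorphic_approach_two (s : String) (t : String) : Bool :=
  if s.toList.length ≠ t.toList.length then false
  else pvALoop s.toList t.toList PySem.Dict.empty PySem.Set.empty

-- ===== PORT B =====
def is_isomorphic_approach_two_alt (s : String) (t : String) : Bool :=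
  if s.toList.length ≠ t.toList.length then false
  else
    let ds := PySem.Set.len (PySem.Set.ofList s.toList)
    let dt := PySem.Set.len (PySem.Set.ofList t.toList)
    let dz := PySem.Set.len (PySem.Set.ofList (s.toList.zip t.toList))
    (ds == dt) && (dt == dz)

-- ===== PRECONDITION & SPEC =====
def Spec_is_isomorphic_approach_two (s : String) (t : String) (out : Bool) : Prop := out = is_isomorphic_approach_two_alt s t
instance (s : String) (t : String) (out : Bool) : Decidable (Spec_is_isomorphic_approach_two s t out) := by unfold Spec_is_isomorphic_approach_two; infer_instance

-- ===== CLAIM (what is proved, stated in full; the proofs are below) =====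
def Claim_equal_is_isomorphic_approach_two : Prop := ∀ (s : String) (t : String), Dom_is_isomorphic_approach_two s t → Spec_is_isomorphic_approach_two s t (is_isomorphic_approach_two s t)

-- ===== LEMMAS AND PROOFS =====

-- the common characterisation: the zipped pairs form a consistent bijective mapping
def pvIso (z : List (Char × Char)) : Prop :=
  ∀ p ∈ z, ∀ q ∈ z, (p.1 = q.1 ↔ p.2 = q.2)

-- a pair is compatible with the map built so far
def pvCompat (m : PySem.Dict Char Char) (p : Char × Char) : Prop :=
  ∀ k c, m.get? k = some c → (p.1 = k ↔ p.2 = c)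

-- invariant of A's loop state: v is exactly the value set of m, and m is value-injective
def pvInv (m : PySem.Dict Char Char) (v : PySem.Set Char) : Prop :=
  (∀ c, PySem.Set.contains v c = true ↔ ∃ k, m.get? k = some c) ∧
  (∀ k k' c, m.get? k = some c → m.get? k' = some c → k = k')

lemma pvALoop_iff (ss : List Char) : ∀ (ts : List Char) (m : PySem.Dict Char Char)
    (v : PySem.Set Char), ss.length = ts.length → pvInv m v →
    (pvALoop ss ts m v = true ↔ (pvIso (ss.zip ts) ∧ ∀ p ∈ ss.zip ts, pvCompat m p)) := by
  induction ss with
  | nil =>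
    intro ts m v hlen _
    simp [pvALoop, pvIso]
  | cons sc ss ih =>
    intro ts m v hlen hinv
    cases ts with
    | nil => simp at hlen
    | cons tc ts =>
      obtain ⟨hv, hinj⟩ := hinv
      simp only [List.length_cons, Nat.add_right_cancel_iff] at hlen
      have hzip : (sc :: ss).zip (tc :: ts) = (sc, tc) :: ss.zip ts := rfl
      rw [hzip]
      cases hm : m.get? sc with
      | some mv =>
        by_cases hmv : mv = tc
        · rw [hmv] at hm
          -- loop continues with unchanged state
          have hrec := ih ts m v hlen ⟨hv, hinj⟩
          have hcsc : pvCompat m (sc, tc) := by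
            intro k c hk
            constructor
            · intro h
              rw [← h, hm] at hk
              exact Option.some.inj hk
            · intro h
              rw [← h] at hk
              exact hinj sc k tc hm hk
          have hstep : (pvIso ((sc, tc) :: ss.zip ts) ∧
              ∀ p ∈ (sc, tc) :: ss.zip ts, pvCompat m p) ↔
              (pvIso (ss.zip ts) ∧ ∀ p ∈ ss.zip ts, pvCompat m p) := by
            constructor
            · rintro ⟨hiso, hcomp⟩
              exact ⟨fun p hp q hq => hiso p (by simp [hp]) q (by simp [hq]),
                fun p hp => hcomp p (by simp [hp])⟩
            · rintro ⟨hiso, hcomp⟩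
              refine ⟨?_, ?_⟩
              · intro p hp q hq
                rcases List.mem_cons.mp hp with hp1 | hp2 <;>
                  rcases List.mem_cons.mp hq with hq1 | hq2
                · simp [hp1, hq1]
                · rw [hp1]
                  have h := (hcomp q hq2) sc tc hm
                  exact ⟨fun h1 => (h.mp h1.symm).symm, fun h1 => (h.mpr h1.symm).symm⟩
                · rw [hq1]
                  exact hcomp p hp2 sc tc hm
                · exact hiso p hp2 q hq2
              · intro p hp
                rcases List.mem_cons.mp hp with hp1 | hp2
                · rw [hp1]; exact hcsc
                · exact hcomp p hp2
          simp only [pvALoop, hm, ne_eq, not_true_eq_false, if_false]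
          rw [hrec]
          exact hstep.symm
        · -- mismatch: loop returns false, and Compat fails for (sc, tc)
          simp only [pvALoop, hm, ne_eq, hmv, not_false_eq_true, if_true]
          constructor
          · intro h
            exact absurd h (by simp)
          · rintro ⟨_, hcomp⟩
            have h := (hcomp (sc, tc) (by simp)) sc mv hm
            exact absurd (h.mp rfl) fun h1 => hmv h1.symm
      | none =>
        by_cases hc : PySem.Set.contains v tc = true
        · -- target already used: loop returns false, and the claim side is false too
          simp only [pvALoop, hm, hc, if_true]
          constructor
          · intro h
            exact absurd h (by simp)
          · rintro ⟨_, hcomp⟩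
            obtain ⟨k, hk⟩ := (hv tc).mp hc
            have hsk : sc = k := ((hcomp (sc, tc) (by simp)) k tc hk).mpr rfl
            rw [← hsk, hm] at hk
            exact absurd hk (by simp)
        · -- fresh pair: state is extended
          have hinv' : pvInv (m.insert sc tc) (PySem.Set.add v tc) := by
            constructor
            · intro c
              rw [PySem.Set.contains_iff, PySem.Set.mem_add]
              constructor
              · rintro (hcv | rfl)
                · obtain ⟨k, hk⟩ := (hv c).mp ((PySem.Set.contains_iff v c).mpr hcv)
                  refine ⟨k, ?_⟩
                  have hne : k ≠ sc := fun h => by rw [h, hm] at hk; exact absurd hk (by simp)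
                  rw [PySem.Dict.get?_insert]
                  simp [hne, hk]
                · exact ⟨sc, by rw [PySem.Dict.get?_insert]; simp⟩
              · rintro ⟨k, hk⟩
                rw [PySem.Dict.get?_insert] at hk
                split_ifs at hk with hksc
                · right
                  exact (Option.some.inj hk).symm
                · left
                  exact (PySem.Set.contains_iff v c).mp ((hv c).mpr ⟨k, hk⟩)
            · intro k k' c hk hk'
              rw [PySem.Dict.get?_insert] at hk hk'
              split_ifs at hk hk' with h1 h2 h2
              · rw [h1, h2]
              · exfalso
                apply hc
                have : c = tc := (Option.some.inj hk).symm
                rw [this] at hk'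
                exact (hv tc).mpr ⟨k', hk'⟩
              · exfalso
                apply hc
                have : c = tc := (Option.some.inj hk').symm
                rw [this] at hk
                exact (hv tc).mpr ⟨k, hk⟩
              · exact hinj k k' c hk hk'
          have hrec := ih ts (m.insert sc tc) (PySem.Set.add v tc) hlen hinv'
          have hcsc : pvCompat m (sc, tc) := by
            intro k c hk
            constructor
            · intro h
              rw [← h, hm] at hk
              exact absurd hk (by simp)
            · intro h
              rw [← h] at hk
              exact absurd ((hv tc).mpr ⟨k, hk⟩) hc
          have hstep : (pvIso ((sc, tc) :: ss.zip ts) ∧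
              ∀ p ∈ (sc, tc) :: ss.zip ts, pvCompat m p) ↔
              (pvIso (ss.zip ts) ∧ ∀ p ∈ ss.zip ts, pvCompat (m.insert sc tc) p) := by
            constructor
            · rintro ⟨hiso, hcomp⟩
              refine ⟨fun p hp q hq => hiso p (by simp [hp]) q (by simp [hq]), ?_⟩
              intro p hp k c hk
              rw [PySem.Dict.get?_insert] at hk
              split_ifs at hk with hksc
              · rw [hksc]
                have h := hiso p (by simp [hp]) (sc, tc) (by simp)
                have hct : tc = c := Option.some.inj hk
                rw [← hct]
                exact h
              · exact (hcomp p (by simp [hp])) k c hk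
            · rintro ⟨hiso, hcomp⟩
              refine ⟨?_, ?_⟩
              · intro p hp q hq
                rcases List.mem_cons.mp hp with hp1 | hp2 <;>
                  rcases List.mem_cons.mp hq with hq1 | hq2
                · simp [hp1, hq1]
                · rw [hp1]
                  have h := (hcomp q hq2) sc tc (by rw [PySem.Dict.get?_insert]; simp)
                  exact ⟨fun h1 => (h.mp h1.symm).symm, fun h1 => (h.mpr h1.symm).symm⟩
                · rw [hq1]
                  exact (hcomp p hp2) sc tc (by rw [PySem.Dict.get?_insert]; simp)
                · exact hiso p hp2 q hq2
              · intro p hp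
                rcases List.mem_cons.mp hp with hp1 | hp2
                · rw [hp1]; exact hcsc
                · intro k c hk
                  have hne : k ≠ sc := fun h => by rw [h, hm] at hk; exact absurd hk (by simp)
                  exact (hcomp p hp2) k c (by rw [PySem.Dict.get?_insert]; simp [hne, hk])
          simp only [pvALoop, hm, hc, if_false, Bool.false_eq_true]
          rw [hrec]
          exact hstep.symm

lemma pvA_iff (ls lt : List Char) (hlen : ls.length = lt.length) :
    pvALoop ls lt PySem.Dict.empty PySem.Set.empty = true ↔ pvIso (ls.zip lt) := by
  rw [pvALoop_iff ls lt PySem.Dict.empty PySem.Set.empty hlen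
    ⟨by simp [PySem.Set.empty, PySem.Dict.get?_empty],
     by simp [PySem.Dict.get?_empty]⟩]
  simp [pvCompat, PySem.Dict.get?_empty]

lemma pvToFinset_map {α β : Type} [DecidableEq α] [DecidableEq β] (l : List α) (f : α → β) :
    (l.map f).toFinset = l.toFinset.image f := by
  ext b; simp

lemma pvLen_ofList (l : List (Char × Char)) :
    PySem.Set.len (PySem.Set.ofList l) = (l.toFinset.card : Int) := by
  rw [PySem.Set.len]
  congr 1
  rw [← List.toFinset_card_of_nodup (PySem.Set.nodup_ofList l)]
  congr 1
  ext x
  simp [PySem.Set.mem_ofList]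

lemma pvLen_ofList_char (l : List Char) :
    PySem.Set.len (PySem.Set.ofList l) = (l.toFinset.card : Int) := by
  rw [PySem.Set.len]
  congr 1
  rw [← List.toFinset_card_of_nodup (PySem.Set.nodup_ofList l)]
  congr 1
  ext x
  simp [PySem.Set.mem_ofList]

lemma pvInjOn_iff (z : List (Char × Char)) :
    pvIso z ↔ (Set.InjOn Prod.fst (z.toFinset : Set (Char × Char)) ∧ Set.InjOn Prod.snd (z.toFinset : Set (Char × Char))) := by
  constructor
  · intro hiso
    constructor
    · intro p hp q hq h
      have hp' : p ∈ z := by simpa using hp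
      have hq' : q ∈ z := by simpa using hq
      exact Prod.ext h ((hiso p hp' q hq').mp h)
    · intro p hp q hq h
      have hp' : p ∈ z := by simpa using hp
      have hq' : q ∈ z := by simpa using hq
      exact Prod.ext ((hiso p hp' q hq').mpr h) h
  · rintro ⟨hf, hs⟩ p hp q hq
    have hp' : p ∈ (z.toFinset : Set (Char × Char)) := by simpa using hp
    have hq' : q ∈ (z.toFinset : Set (Char × Char)) := by simpa using hq
    constructor
    · intro h; exact congrArg Prod.snd (hf hp' hq' h)
    · intro h; exact congrArg Prod.fst (hs hp' hq' h)

lemma pvB_iff (ls lt : List Char) (hlen : ls.length = lt.length) :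
    ((PySem.Set.len (PySem.Set.ofList ls) == PySem.Set.len (PySem.Set.ofList lt)) &&
     (PySem.Set.len (PySem.Set.ofList lt) ==
      PySem.Set.len (PySem.Set.ofList (ls.zip lt)))) = true ↔ pvIso (ls.zip lt) := by
  rw [Bool.and_eq_true, beq_iff_eq, beq_iff_eq,
    pvLen_ofList_char, pvLen_ofList_char, pvLen_ofList, pvInjOn_iff]
  have hfs : (ls.zip lt).map Prod.fst = ls := List.map_fst_zip (le_of_eq hlen)
  have hsn : (ls.zip lt).map Prod.snd = lt := List.map_snd_zip (le_of_eq hlen.symm)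
  have hfst : ls.toFinset = (ls.zip lt).toFinset.image Prod.fst := by
    rw [← pvToFinset_map, hfs]
  have hsnd : lt.toFinset = (ls.zip lt).toFinset.image Prod.snd := by
    rw [← pvToFinset_map, hsn]
  rw [hfst, hsnd]
  constructor
  · rintro ⟨h1, h2⟩
    have h2' : ((ls.zip lt).toFinset.image Prod.snd).card = (ls.zip lt).toFinset.card := by
      exact_mod_cast h2
    have h1' : ((ls.zip lt).toFinset.image Prod.fst).card = (ls.zip lt).toFinset.card := by
      have : ((ls.zip lt).toFinset.image Prod.fst).card
          = ((ls.zip lt).toFinset.image Prod.snd).card := by exact_mod_cast h1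
      rw [this, h2']
    exact ⟨Finset.card_image_iff.mp h1', Finset.card_image_iff.mp h2'⟩
  · rintro ⟨hf, hs⟩
    have h1 := Finset.card_image_iff.mpr hf
    have h2 := Finset.card_image_iff.mpr hs
    constructor
    · exact_mod_cast h1.trans h2.symm
    · exact_mod_cast h2

-- ===== VERDICT (by name: the statement is the Claim_ definition above) =====
theorem is_isomorphic_approach_two_spec : Claim_equal_is_isomorphic_approach_two := by
  intro s t _
  unfold Spec_is_isomorphic_approach_two is_isomorphic_approach_two is_isomorphic_approach_two_alt
  by_cases hlen : s.toList.length = t.toList.length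
  · rw [if_neg (fun h => h hlen), if_neg (fun h => h hlen)]
    rw [← Bool.coe_iff_coe, pvA_iff s.toList t.toList hlen]
    exact (pvB_iff s.toList t.toList hlen).symm
  · rw [if_pos hlen, if_pos hlen]
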